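-- pv_equiv track=rewrite | github.com/kad99kev/FGTD | scripts/caption_generation/generate_captions.py | generate_facial_features
-- ===== SOURCE A (Python) =====
-- def generate_facial_features(facial_features, is_male):
--     """
--     Generates a sentence based on the attributes that describe the facial features
--     """
--
--     sentence = "He" if is_male else "She"
--     sentence += " has"
--
--     def nose_and_mouth(attribute):
--         """
--         Returns a grammatically correct sentence based on the attribute
--         """
--
--         if attribute == "big nose" or attribute == "pointy nose":
--             return "a " + attribute
--         elif attribute == "mouth slightly open":
--             return "a slightly open mouth"
--         return attribute
--
--     if len(facial_features) == 1:
--         attribute = nose_and_mouth(" ".join(facial_features[0].lower().split("_")))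
--         return sentence + " " + attribute + "."
--
--     for i, attribute in enumerate(facial_features):
--         attribute = nose_and_mouth(" ".join(attribute.lower().split("_")))
--
--         if i == len(facial_features) - 1:
--             sentence = sentence[:-1]
--             sentence += " and " + attribute + "."
--         else:
--             sentence += " " + attribute + ","
--
--     return sentence
-- ===== SOURCE B (Python) =====
-- def generate_facial_features(facial_features, is_male):
--     """
--     Generates a sentence based on the attributes that describe the facial features
--     """
--
--     def nose_and_mouth(attribute):
--         if attribute == "big nose" or attribute == "pointy nose":
--             return "a " + attribute
--         if attribute == "mouth slightly open":
--             return "a slightly open mouth"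
--         return attribute
--
--     phrases = [nose_and_mouth(" ".join(a.lower().split("_"))) for a in facial_features]
--     prefix = ("He" if is_male else "She") + " has"
--     if not phrases:
--         return prefix
--     if len(phrases) == 1:
--         return prefix + " " + phrases[0] + "."
--     return prefix + " " + ", ".join(phrases[:-1]) + " and " + phrases[-1] + "."
-- ===== Notes on version B (the rewrite author's own statement) =====
-- stated objective: simpler
-- what changed: B first maps every raw attribute to its display phrase, then assembles the sentence in one shot by cases on the phrase count with a ', '-join for the leading phrases, instead of A's in-place accumulation with index bookkeeping and a trailing-comma trim via sentence[:-1].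
import Mathlib
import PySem

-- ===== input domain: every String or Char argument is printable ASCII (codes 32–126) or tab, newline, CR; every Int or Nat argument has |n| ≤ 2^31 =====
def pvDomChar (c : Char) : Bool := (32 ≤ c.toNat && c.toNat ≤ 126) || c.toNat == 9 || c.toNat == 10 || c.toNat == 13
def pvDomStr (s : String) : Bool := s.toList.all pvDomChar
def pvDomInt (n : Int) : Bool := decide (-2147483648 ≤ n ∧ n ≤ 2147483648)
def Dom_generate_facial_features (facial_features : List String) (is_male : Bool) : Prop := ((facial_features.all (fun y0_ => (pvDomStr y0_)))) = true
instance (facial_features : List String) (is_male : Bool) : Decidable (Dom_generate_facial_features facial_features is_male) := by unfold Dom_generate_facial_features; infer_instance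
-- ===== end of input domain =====

-- B simplifies A's in-place accumulation + trailing-comma trim into a map followed by a join-based assembly by cases on the phrase count (objective: simpler).

-- ===== PORT A =====
-- the nested helper 'nose_and_mouth' (textually identical in A and in B; shared)
def noseAndMouth (attr : String) : String :=
  if attr == "big nose" || attr == "pointy nose" then "a " ++ attr
  else if attr == "mouth slightly open" then "a slightly open mouth"
  else attr

-- nose_and_mouth(" ".join(attribute.lower().split("_"))) — the per-item normalization, identical in both sources
def pyPhrase (a : String) : String :=
  noseAndMouth (PySem.Str.join " " ((PySem.Str.split? (PySem.Str.lower a) "_").getD []))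

-- A's 'for i, attribute in enumerate(facial_features)' loop, carrying the sentence accumulator
def loopA (n : Int) : List (Int × String) → String → String
  | [], sentence => sentence
  | (i, attr) :: rest, sentence =>
    let p := pyPhrase attr
    if i == n - 1 then
      loopA n rest (PySem.Str.slice sentence none (some (-1)) ++ " and " ++ p ++ ".")
    else
      loopA n rest (sentence ++ " " ++ p ++ ",")

def generate_facial_features (facial_features : List String) (is_male : Bool) : String :=
  let sentence := (if is_male then "He" else "She") ++ " has"
  if facial_features.length == 1 then
    sentence ++ " " ++ pyPhrase (PySem.List.pyGetD facial_features 0 "") ++ "."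
  else
    loopA (facial_features.length : Int) (PySem.List.enumerate facial_features 0) sentence

-- ===== PORT B =====
def generate_facial_features_alt (facial_features : List String) (is_male : Bool) : String :=
  let phrases := facial_features.map pyPhrase
  let pre := ((if is_male then "He" else "She") ++ " has")
  match phrases with
  | [] => pre
  | [p] => pre ++ " " ++ p ++ "."
  | _ => pre ++ " " ++ PySem.Str.join ", " (PySem.List.slice phrases none (some (-1)))
             ++ " and " ++ PySem.List.pyGetD phrases (-1) "" ++ "."

-- ===== PRECONDITION & SPEC =====
def Spec_generate_facial_features (facial_features : List String) (is_male : Bool) (out : String) : Prop := out = generate_facial_features_alt facial_features is_male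
instance (facial_features : List String) (is_male : Bool) (out : String) : Decidable (Spec_generate_facial_features facial_features is_male out) := by unfold Spec_generate_facial_features; infer_instance

-- ===== CLAIM (what is proved, stated in full; the proofs are below) =====
def Claim_equal_generate_facial_features : Prop := ∀ (facial_features : List String) (is_male : Bool), Dom_generate_facial_features facial_features is_male → Spec_generate_facial_features facial_features is_male (generate_facial_features facial_features is_male)

-- ===== LEMMAS AND PROOFS =====

-- one middle step of A's loop (i not last): append " <phrase>,"
theorem loopA_cons_mid (n i : Int) (a : String) (rest : List (Int × String)) (s : String)
    (h : ¬ (i == n - 1) = true) :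
    loopA n ((i, a) :: rest) s = loopA n rest (s ++ " " ++ pyPhrase a ++ ",") := by
  simp [loopA, h]

-- the last step of A's loop: trim the trailing comma, append " and <phrase>."
theorem loopA_cons_last (n i : Int) (a : String) (rest : List (Int × String)) (s : String)
    (h : (i == n - 1) = true) :
    loopA n ((i, a) :: rest) s
      = loopA n rest (PySem.Str.slice s none (some (-1)) ++ " and " ++ pyPhrase a ++ ".") := by
  simp [loopA, h]

-- A's loop on two-or-more items equals B's join-based assembly (induction with a generalized accumulator)
theorem loopA_two (n : Int) : ∀ (rest : List String) (x y : String) (j : Int) (s : String),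
    j + (2 + (rest.length : Int)) = n →
    loopA n (PySem.List.enumerate (x :: y :: rest) j) s =
      s ++ " " ++ PySem.Str.join ", " (((x :: y :: rest).map pyPhrase).dropLast)
        ++ " and " ++ (((x :: y :: rest).map pyPhrase).getLastD "") ++ "." := by
  intro rest
  induction rest with
  | nil =>
    intro x y j s hj
    simp only [List.length_nil, Nat.cast_zero, add_zero] at hj
    have hj1 : ¬ (j == n - 1) = true := by simp; omega
    have hj2 : (j + 1 == n - 1) = true := by simp; omega
    rw [PySem.List.enumerate_cons, PySem.List.enumerate_cons, PySem.List.enumerate_nil,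
      loopA_cons_mid n j x _ s hj1, loopA_cons_last n (j + 1) y _ _ hj2]
    show PySem.Str.slice (s ++ " " ++ pyPhrase x ++ ",") none (some (-1)) ++ " and " ++ pyPhrase y ++ "." = _
    apply String.toList_inj.mp
    have hd : (s.toList ++ ' ' :: ((pyPhrase x).toList ++ [','])).dropLast
        = s.toList ++ ' ' :: (pyPhrase x).toList := by
      rw [show ' ' :: ((pyPhrase x).toList ++ [',']) = (' ' :: (pyPhrase x).toList) ++ [','] from rfl,
        ← List.append_assoc, List.dropLast_concat]
    simp [PySem.List.slice_to_neg_one, hd]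
  | cons z rest' ih =>
    intro x y j s hj
    simp only [List.length_cons] at hj
    have hj1 : ¬ (j == n - 1) = true := by simp; omega
    rw [PySem.List.enumerate_cons, loopA_cons_mid n j x _ s hj1,
      ih y z (j + 1) _ (by omega)]
    apply String.toList_inj.mp
    simp [PySem.Str.toList_join, PySem.Chars.join_cons_cons]

-- last element of the mapped phrase list = phrase of the last raw feature
theorem getLastD_map_phrase (f : String → String) : ∀ (l : List String) (b : String),
    (f b :: l.map f).getLast?.getD "" = f (l.getLast?.getD b) := by
  intro l
  induction l with
  | nil => intro b; rfl
  | cons c l ih =>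
    intro b
    rw [List.map_cons, List.getLast?_cons_cons, ih c]
    cases l with
    | nil => rfl
    | cons d l => simp [List.getLast?_cons]

theorem ports_agree (facial_features : List String) (is_male : Bool) :
    generate_facial_features facial_features is_male
      = generate_facial_features_alt facial_features is_male := by
  match facial_features with
  | [] =>
    simp [generate_facial_features, generate_facial_features_alt, loopA]
  | [a] =>
    simp [generate_facial_features, generate_facial_features_alt,
      PySem.List.pyGetD_zero_cons]
  | a :: b :: rest =>
    have hlen : ¬ ((a :: b :: rest).length == 1) = true := by simp
    simp only [generate_facial_features, generate_facial_features_alt, hlen]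
    rw [loopA_two _ rest a b 0 _ (by simp; omega)]
    have hne : (a :: b :: rest).map pyPhrase ≠ [] := by simp
    rw [PySem.List.slice_to_neg_one, PySem.List.pyGetD_neg_one _ "" hne]
    simp [List.getLast_eq_getLastD, getLastD_map_phrase pyPhrase]

-- ===== VERDICT (by name: the statement is the Claim_ definition above) =====
theorem generate_facial_features_spec : Claim_equal_generate_facial_features := by
  intro ff m _
  unfold Spec_generate_facial_features
  exact ports_agree ff m
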